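-- pv_equiv track=rewrite | github.com/bonshot/TDA_practicando | practica_por_temas/ejercicios_greedy.py | asignar_salas
-- ===== SOURCE A (Python) =====
-- def asignar_salas(oradores, m):
--     oradores_ordenados = sorted(oradores, key=lambda x: (x[0], x[1]))  # Ordenar oradores por tiempo de inicio
--
--     salas = [[] for _ in range(m)]  # Inicializar salas
--
--     for orador in oradores_ordenados:
--         asignado = False
--         orador_inicio = (orador[0], orador[1])
--         orador_fin = (orador[2], orador[3])
--
--         for sala in salas:
--             if not sala or orador_inicio >= (sala[-1][2], sala[-1][3] + 15):
--                 sala.append((orador_inicio[0], orador_inicio[1], orador_fin[0], orador_fin[1]))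
--                 asignado = True
--                 break
--
--         if not asignado:
--             salas.append([(orador_inicio[0], orador_inicio[1], orador_fin[0], orador_fin[1])])  # Asignar una nueva sala
--
--     return salas
-- ===== SOURCE B (Python) =====
-- def _insort(lst, x):
--     # insert x into the ascending list lst, keeping it sorted
--     i = 0
--     while i < len(lst) and lst[i] < x:
--         i += 1
--     lst.insert(i, x)
--
--
-- def asignar_salas(oradores, m):
--     orden = sorted(oradores, key=lambda x: (x[0], x[1]))
--     salas = [[] for _ in range(m)]
--     libres = list(range(m))   # sorted indices of rooms currently available
--     ocupadas = []             # sorted list of ((fin_h, fin_m + 15), idx) for busy rooms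
--     for o in orden:
--         inicio = (o[0], o[1])
--         # starts are non-decreasing, so release every room whose key is <= this start
--         while ocupadas and ocupadas[0][0] <= inicio:
--             _insort(libres, ocupadas.pop(0)[1])
--         if libres:
--             i = libres.pop(0)
--         else:
--             i = len(salas)
--             salas.append([])
--         salas[i].append((o[0], o[1], o[2], o[3]))
--         _insort(ocupadas, ((o[2], o[3] + 15), i))
--     return salas
-- ===== Notes on version B (the rewrite author's own statement) =====
-- stated objective: alternative
-- what changed: Replaces A's per-speaker linear first-fit scan over the whole rooms list by free/busy bookkeeping: a sorted list of free room indices plus a busy list sorted by release key (end hour, end minute + 15); since speakers are processed in sorted start order, each room is released exactly once per reuse and the lowest free index is the first-fit room.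
import Mathlib
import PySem

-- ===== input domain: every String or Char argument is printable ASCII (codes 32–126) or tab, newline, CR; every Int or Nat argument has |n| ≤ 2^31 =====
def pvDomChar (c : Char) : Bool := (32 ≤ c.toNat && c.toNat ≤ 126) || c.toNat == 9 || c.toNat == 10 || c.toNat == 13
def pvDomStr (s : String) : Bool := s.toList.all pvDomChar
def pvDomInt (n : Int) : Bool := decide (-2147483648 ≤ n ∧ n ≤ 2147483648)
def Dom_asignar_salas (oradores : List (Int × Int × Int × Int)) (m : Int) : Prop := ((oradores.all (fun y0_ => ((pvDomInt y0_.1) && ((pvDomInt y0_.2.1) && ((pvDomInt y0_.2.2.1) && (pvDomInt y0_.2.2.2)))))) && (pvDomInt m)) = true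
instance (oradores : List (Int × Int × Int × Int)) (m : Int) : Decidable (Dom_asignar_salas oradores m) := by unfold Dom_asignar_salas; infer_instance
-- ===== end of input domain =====

-- B replaces A's per-speaker linear scan over all rooms by a free-list / busy-list
-- scheme (sorted index list of free rooms + busy rooms sorted by release key),
-- releasing each room once when its gap has elapsed; an alternative algorithm, same results.

-- ===== PORT A =====

-- 'orador_inicio >= (c, d + 15)' : Python lexicographic tuple comparison
def pvGeKey (s k : Int × Int) : Bool :=
  decide (k.1 < s.1) || (decide (s.1 = k.1) && decide (k.2 ≤ s.2))

-- 'not sala or orador_inicio >= (sala[-1][2], sala[-1][3] + 15)'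
def pvFits (sala : List (Int × Int × Int × Int)) (s : Int × Int) : Bool :=
  match sala.getLast? with
  | none => true
  | some u => pvGeKey s (u.2.2.1, u.2.2.2 + 15)

-- the 'for sala in salas: … break' scan; none = no room accepted the speaker
def pvPlace (salas : List (List (Int × Int × Int × Int))) (o : Int × Int × Int × Int) :
    Option (List (List (Int × Int × Int × Int))) :=
  match salas with
  | [] => none
  | sala :: rest =>
      if pvFits sala (o.1, o.2.1) then
        some ((sala ++ [(o.1, o.2.1, o.2.2.1, o.2.2.2)]) :: rest)
      else
        (pvPlace rest o).map (sala :: ·)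

-- one iteration of the outer loop ('if not asignado: salas.append([…])')
def pvStepA (salas : List (List (Int × Int × Int × Int))) (o : Int × Int × Int × Int) :
    List (List (Int × Int × Int × Int)) :=
  match pvPlace salas o with
  | some s => s
  | none => salas ++ [[(o.1, o.2.1, o.2.2.1, o.2.2.2)]]

def asignar_salas (oradores : List (Int × Int × Int × Int)) (m : Int) :
    List (List (Int × Int × Int × Int)) :=
  (PySem.List.sorted2 oradores (fun x => x.1) (fun x => x.2.1) false).foldl pvStepA
    (List.replicate m.toNat [])

-- ===== PORT B =====

-- _insort on the (ascending) free-room index list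
def pvInsortIdx (lst : List Nat) (x : Nat) : List Nat :=
  match lst with
  | [] => [x]
  | y :: ys => if y < x then y :: pvInsortIdx ys x else x :: y :: ys

-- Python '<' on ((h, m), idx) nested tuples, lexicographic
def pvLtKI (a b : (Int × Int) × Nat) : Bool :=
  decide (a.1.1 < b.1.1) ||
    (decide (a.1.1 = b.1.1) &&
      (decide (a.1.2 < b.1.2) || (decide (a.1.2 = b.1.2) && decide (a.2 < b.2))))

-- _insort on the busy list, sorted ascending by ((h, m), idx)
def pvInsortBusy (lst : List ((Int × Int) × Nat)) (x : (Int × Int) × Nat) :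
    List ((Int × Int) × Nat) :=
  match lst with
  | [] => [x]
  | y :: ys => if pvLtKI y x then y :: pvInsortBusy ys x else x :: y :: ys

-- 'ocupadas[0][0] <= inicio' : Python lexicographic tuple comparison
def pvLeKey (k s : Int × Int) : Bool :=
  decide (k.1 < s.1) || (decide (k.1 = s.1) && decide (k.2 ≤ s.2))

-- 'while ocupadas and ocupadas[0][0] <= inicio: _insort(libres, ocupadas.pop(0)[1])'
def pvRelease (ocup : List ((Int × Int) × Nat)) (libres : List Nat) (s : Int × Int) :
    List ((Int × Int) × Nat) × List Nat :=
  match ocup with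
  | [] => ([], libres)
  | e :: rest =>
      if pvLeKey e.1 s then pvRelease rest (pvInsortIdx libres e.2) s
      else (e :: rest, libres)

-- one iteration of B's loop: release, take lowest free index (or open a new room), record busy
def pvStepB
    (st : List (List (Int × Int × Int × Int)) × List Nat × List ((Int × Int) × Nat))
    (o : Int × Int × Int × Int) :
    List (List (Int × Int × Int × Int)) × List Nat × List ((Int × Int) × Nat) :=
  let r := pvRelease st.2.2 st.2.1 (o.1, o.2.1)
  match r.2 with
  | i :: restL =>
      (st.1.set i ((st.1.getD i []) ++ [(o.1, o.2.1, o.2.2.1, o.2.2.2)]), restL,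
        pvInsortBusy r.1 ((o.2.2.1, o.2.2.2 + 15), i))
  | [] =>
      (st.1 ++ [[(o.1, o.2.1, o.2.2.1, o.2.2.2)]], [],
        pvInsortBusy r.1 ((o.2.2.1, o.2.2.2 + 15), st.1.length))

def asignar_salas_alt (oradores : List (Int × Int × Int × Int)) (m : Int) :
    List (List (Int × Int × Int × Int)) :=
  ((PySem.List.sorted2 oradores (fun x => x.1) (fun x => x.2.1) false).foldl pvStepB
    (List.replicate m.toNat [], List.range m.toNat, [])).1

-- ===== PRECONDITION & SPEC =====
def Spec_asignar_salas (oradores : List (Int × Int × Int × Int)) (m : Int) (out : List (List (Int × Int × Int × Int))) : Prop := out = asignar_salas_alt oradores m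
instance (oradores : List (Int × Int × Int × Int)) (m : Int) (out : List (List (Int × Int × Int × Int))) : Decidable (Spec_asignar_salas oradores m out) := by unfold Spec_asignar_salas; infer_instance

-- ===== CLAIM (what is proved, stated in full; the proofs are below) =====
def Claim_equal_asignar_salas : Prop := ∀ (oradores : List (Int × Int × Int × Int)) (m : Int), Dom_asignar_salas oradores m → Spec_asignar_salas oradores m (asignar_salas oradores m)

-- ===== LEMMAS AND PROOFS =====

-- lexicographic ≤ on (hour, minute) keys, as a Prop
def KLE (a b : Int × Int) : Prop := a.1 < b.1 ∨ (a.1 = b.1 ∧ a.2 ≤ b.2)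

-- availability key of a room: (end hour, end minute + 15) of its last talk
def roomKey (r : List (Int × Int × Int × Int)) : Option (Int × Int) :=
  r.getLast?.map (fun u => (u.2.2.1, u.2.2.2 + 15))

-- "room r is known to be free at time t" (t = none before any speaker was placed)
def FreeAt (r : List (Int × Int × Int × Int)) : Option (Int × Int) → Prop
  | none => r = []
  | some s => pvFits r s = true

def TLE : Option (Int × Int) → (Int × Int) → Prop
  | none, _ => True
  | some a, s => KLE a s

-- simulation invariant between A's rooms list and B's (libres, ocupadas) bookkeeping
def SimInv (salas : List (List (Int × Int × Int × Int))) (li : List Nat)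
    (oc : List ((Int × Int) × Nat)) (t : Option (Int × Int)) : Prop :=
  li.Pairwise (· ≤ ·) ∧
  oc.Pairwise (fun a b => KLE a.1 b.1) ∧
  (∀ e ∈ oc, e.2 < salas.length ∧ roomKey (salas.getD e.2 []) = some e.1) ∧
  (∀ i ∈ li, i < salas.length ∧ FreeAt (salas.getD i []) t) ∧
  (li ++ oc.map (·.2)).Perm (List.range salas.length)

lemma KLE_trans {a b c : Int × Int} (h1 : KLE a b) (h2 : KLE b c) : KLE a c := by
  unfold KLE at *; omega

lemma geKey_iff (s k : Int × Int) : pvGeKey s k = true ↔ KLE k s := by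
  simp [pvGeKey, KLE]; omega

lemma leKey_iff (k s : Int × Int) : pvLeKey k s = true ↔ KLE k s := by
  simp [pvLeKey, KLE]

lemma fits_iff (r : List (Int × Int × Int × Int)) (s : Int × Int) :
    pvFits r s = true ↔ (∀ k, roomKey r = some k → KLE k s) := by
  cases h : r.getLast? with
  | none => simp [pvFits, roomKey, h]
  | some u => simp [pvFits, roomKey, h, geKey_iff]

lemma fits_mono {r : List (Int × Int × Int × Int)} {s₀ s : Int × Int}
    (h : pvFits r s₀ = true) (hle : KLE s₀ s) : pvFits r s = true := by
  rw [fits_iff] at *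
  exact fun k hk => KLE_trans (h k hk) hle

lemma freeAt_fits {r : List (Int × Int × Int × Int)} {t : Option (Int × Int)} {s : Int × Int}
    (h : FreeAt r t) (ht : TLE t s) : pvFits r s = true := by
  cases t with
  | none =>
      simp only [FreeAt] at h
      subst h
      rfl
  | some a => exact fits_mono h ht

-- pvInsortIdx: permutation and order preservation
lemma insortIdx_perm (l : List Nat) (x : Nat) : (pvInsortIdx l x).Perm (x :: l) := by
  induction l with
  | nil => simp [pvInsortIdx]
  | cons y ys ih =>
      simp only [pvInsortIdx]
      split
      · exact ((ih.cons y).trans (List.Perm.swap x y ys))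
      · exact List.Perm.refl _

lemma insortIdx_pairwise {l : List Nat} (x : Nat) (h : l.Pairwise (· ≤ ·)) :
    (pvInsortIdx l x).Pairwise (· ≤ ·) := by
  induction l with
  | nil => simp [pvInsortIdx]
  | cons y ys ih =>
      rw [List.pairwise_cons] at h
      simp only [pvInsortIdx]
      split
      · rename_i hlt
        refine List.pairwise_cons.mpr ⟨?_, ih h.2⟩
        intro z hz
        rcases List.mem_cons.mp ((insortIdx_perm ys x).mem_iff.mp hz) with rfl | hz
        · omega
        · exact h.1 z hz
      · rename_i hlt
        refine List.pairwise_cons.mpr ⟨?_, List.pairwise_cons.mpr h⟩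
        intro z hz
        rcases List.mem_cons.mp hz with rfl | hz
        · omega
        · exact le_trans (by omega) (h.1 z hz)

-- pvInsortBusy: permutation and key-order preservation
lemma insortBusy_perm (l : List ((Int × Int) × Nat)) (x : (Int × Int) × Nat) :
    (pvInsortBusy l x).Perm (x :: l) := by
  induction l with
  | nil => simp [pvInsortBusy]
  | cons y ys ih =>
      simp only [pvInsortBusy]
      split
      · exact ((ih.cons y).trans (List.Perm.swap x y ys))
      · exact List.Perm.refl _

lemma ltKI_true_kle {a b : (Int × Int) × Nat} (h : pvLtKI a b = true) : KLE a.1 b.1 := by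
  simp [pvLtKI] at h; unfold KLE; omega

lemma ltKI_false_kle {a b : (Int × Int) × Nat} (h : pvLtKI a b = false) : KLE b.1 a.1 := by
  simp [pvLtKI] at h; unfold KLE; omega

lemma insortBusy_pairwise {l : List ((Int × Int) × Nat)} (x : (Int × Int) × Nat)
    (h : l.Pairwise (fun a b => KLE a.1 b.1)) :
    (pvInsortBusy l x).Pairwise (fun a b => KLE a.1 b.1) := by
  induction l with
  | nil => simp [pvInsortBusy]
  | cons y ys ih =>
      rw [List.pairwise_cons] at h
      simp only [pvInsortBusy]
      split
      · rename_i hlt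
        refine List.pairwise_cons.mpr ⟨?_, ih h.2⟩
        intro z hz
        rcases List.mem_cons.mp ((insortBusy_perm ys x).mem_iff.mp hz) with rfl | hz
        · exact ltKI_true_kle hlt
        · exact h.1 z hz
      · rename_i hlt
        refine List.pairwise_cons.mpr ⟨?_, List.pairwise_cons.mpr h⟩
        intro z hz
        have hyx := ltKI_false_kle (Bool.eq_false_iff.mpr hlt)
        rcases List.mem_cons.mp hz with rfl | hz
        · exact hyx
        · exact KLE_trans hyx (h.1 z hz)

-- what the release loop guarantees
lemma release_spec (salas : List (List (Int × Int × Int × Int))) (s : Int × Int) :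
    ∀ (oc : List ((Int × Int) × Nat)) (li : List Nat),
    oc.Pairwise (fun a b => KLE a.1 b.1) →
    (∀ e ∈ oc, e.2 < salas.length ∧ roomKey (salas.getD e.2 []) = some e.1) →
    li.Pairwise (· ≤ ·) →
    (∀ i ∈ li, i < salas.length ∧ pvFits (salas.getD i []) s = true) →
    (pvRelease oc li s).1.Pairwise (fun a b => KLE a.1 b.1) ∧
    (∀ e ∈ (pvRelease oc li s).1,
        e.2 < salas.length ∧ roomKey (salas.getD e.2 []) = some e.1 ∧ ¬ KLE e.1 s) ∧
    (pvRelease oc li s).2.Pairwise (· ≤ ·) ∧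
    (∀ i ∈ (pvRelease oc li s).2, i < salas.length ∧ pvFits (salas.getD i []) s = true) ∧
    ((pvRelease oc li s).2 ++ (pvRelease oc li s).1.map (·.2)).Perm (li ++ oc.map (·.2)) := by
  intro oc
  induction oc with
  | nil =>
      intro li _ _ hliP hliF
      exact ⟨by simp [pvRelease], by simp [pvRelease], by simpa [pvRelease] using hliP,
        by simpa [pvRelease] using hliF, by simp [pvRelease]⟩
  | cons e rest ih =>
      intro li hocP hocK hliP hliF
      by_cases hle : pvLeKey e.1 s = true
      · simp only [pvRelease, hle, if_true]
        obtain ⟨heB, heK⟩ := hocK e (List.mem_cons_self ..)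
        have hfit : pvFits (salas.getD e.2 []) s = true := by
          rw [fits_iff]
          intro k hk
          rw [heK] at hk
          injection hk with hk
          rw [← hk]
          exact (leKey_iff _ _).mp hle
        have hres := ih (pvInsortIdx li e.2)
          (List.pairwise_cons.mp hocP).2
          (fun f hf => hocK f (List.mem_cons_of_mem _ hf))
          (insortIdx_pairwise _ hliP)
          (by
            intro i hi
            rcases List.mem_cons.mp ((insortIdx_perm li e.2).mem_iff.mp hi) with rfl | hi
            · exact ⟨heB, hfit⟩
            · exact hliF i hi)
        refine ⟨hres.1, hres.2.1, hres.2.2.1, hres.2.2.2.1, ?_⟩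
        refine hres.2.2.2.2.trans ?_
        have h1 : (pvInsortIdx li e.2 ++ rest.map (·.2)).Perm ((e.2 :: li) ++ rest.map (·.2)) :=
          (insortIdx_perm li e.2).append_right _
        refine h1.trans ?_
        show (e.2 :: (li ++ rest.map (·.2))).Perm (li ++ (e.2 :: rest.map (·.2)))
        exact List.perm_middle.symm
      · simp only [pvRelease, hle, if_false, Bool.false_eq_true]
        have hnk : ¬ KLE e.1 s := fun hk => hle ((leKey_iff _ _).mpr hk)
        refine ⟨hocP, ?_, hliP, hliF, by simp⟩
        intro f hf
        rcases List.mem_cons.mp hf with rfl | hf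
        · exact ⟨(hocK f (List.mem_cons_self ..)).1, (hocK f (List.mem_cons_self ..)).2, hnk⟩
        · refine ⟨(hocK f (List.mem_cons_of_mem _ hf)).1, (hocK f (List.mem_cons_of_mem _ hf)).2, ?_⟩
          intro hks
          exact hnk (KLE_trans ((List.pairwise_cons.mp hocP).1 f hf) hks)

-- A's scan succeeds exactly at the least fitting index
lemma place_none (o : Int × Int × Int × Int) :
    ∀ salas, (∀ j, j < salas.length → pvFits (salas.getD j []) (o.1, o.2.1) = false) →
    pvPlace salas o = none := by
  intro salas
  induction salas with
  | nil => intro _; rfl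
  | cons sala rest ih =>
      intro h
      have h0 := h 0 (by simp)
      simp only [List.getD, List.getElem?_cons_zero, Option.getD_some] at h0
      have hrest : pvPlace rest o = none := by
        refine ih ?_
        intro j hj
        have := h (j+1) (by simpa using Nat.succ_lt_succ hj)
        simpa using this
      simp [pvPlace, h0, hrest]

lemma place_some (o : Int × Int × Int × Int) :
    ∀ (salas : List (List (Int × Int × Int × Int))) (h : Nat), h < salas.length →
    pvFits (salas.getD h []) (o.1, o.2.1) = true →
    (∀ j, j < h → pvFits (salas.getD j []) (o.1, o.2.1) = false) →
    pvPlace salas o =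
      some (salas.set h ((salas.getD h []) ++ [(o.1, o.2.1, o.2.2.1, o.2.2.2)])) := by
  intro salas
  induction salas with
  | nil => intro h hh; simp at hh
  | cons sala rest ih =>
      intro h hh hfit hbefore
      cases h with
      | zero =>
          simp only [List.getD, List.getElem?_cons_zero, Option.getD_some] at hfit
          simp [pvPlace, hfit, List.getD]
      | succ h =>
          have h0 := hbefore 0 (by omega)
          simp only [List.getD, List.getElem?_cons_zero, Option.getD_some] at h0
          have := ih h (by simpa using Nat.lt_of_succ_lt_succ hh)
            (by simpa [List.getD] using hfit)
            (fun j hj => by simpa [List.getD] using hbefore (j+1) (by omega))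
          simp [pvPlace, h0, this, List.getD]

-- one simulated step
lemma step_sim (salas : List (List (Int × Int × Int × Int))) (li : List Nat)
    (oc : List ((Int × Int) × Nat)) (t : Option (Int × Int)) (o : Int × Int × Int × Int)
    (hInv : SimInv salas li oc t) (ht : TLE t (o.1, o.2.1)) :
    (pvStepB (salas, li, oc) o).1 = pvStepA salas o ∧
    SimInv (pvStepB (salas, li, oc) o).1 (pvStepB (salas, li, oc) o).2.1
        (pvStepB (salas, li, oc) o).2.2 (some (o.1, o.2.1)) := by
  obtain ⟨hliP, hocP, hocK, hliF, hperm⟩ := hInv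
  have hliF' : ∀ i ∈ li, i < salas.length ∧ pvFits (salas.getD i []) (o.1, o.2.1) = true :=
    fun i hi => ⟨(hliF i hi).1, freeAt_fits (hliF i hi).2 ht⟩
  obtain ⟨hrocP, hrocK, hrliP, hrliF, hrperm⟩ :=
    release_spec salas (o.1, o.2.1) oc li hocP hocK hliP hliF'
  have hperm' : ((pvRelease oc li (o.1, o.2.1)).2 ++
      (pvRelease oc li (o.1, o.2.1)).1.map (·.2)).Perm (List.range salas.length) :=
    hrperm.trans hperm
  have hnodup : ((pvRelease oc li (o.1, o.2.1)).2 ++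
      (pvRelease oc li (o.1, o.2.1)).1.map (·.2)).Nodup :=
    hperm'.nodup_iff.mpr List.nodup_range
  have hchar : ∀ i, i ∈ (pvRelease oc li (o.1, o.2.1)).2 ↔
      (i < salas.length ∧ pvFits (salas.getD i []) (o.1, o.2.1) = true) := by
    intro i
    constructor
    · exact hrliF i
    · rintro ⟨hlen, hfit⟩
      have hmem : i ∈ (pvRelease oc li (o.1, o.2.1)).2 ++
          (pvRelease oc li (o.1, o.2.1)).1.map (·.2) :=
        hperm'.mem_iff.mpr (List.mem_range.mpr hlen)
      rcases List.mem_append.mp hmem with h | h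
      · exact h
      · exfalso
        obtain ⟨e, he, rfl⟩ := List.mem_map.mp h
        exact (hrocK e he).2.2 ((fits_iff ..).mp hfit _ (hrocK e he).2.1)
  cases hcase : (pvRelease oc li (o.1, o.2.1)).2 with
  | cons i restL =>
      have hi : i < salas.length ∧ pvFits (salas.getD i []) (o.1, o.2.1) = true :=
        (hchar i).mp (by rw [hcase]; exact List.mem_cons_self ..)
      have hmin : ∀ j ∈ restL, i ≤ j := by
        have h := hrliP
        rw [hcase, List.pairwise_cons] at h
        exact h.1
      have hbefore : ∀ j, j < i → pvFits (salas.getD j []) (o.1, o.2.1) = false := by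
        intro j hj
        cases hf : pvFits (salas.getD j []) (o.1, o.2.1)
        · rfl
        · exfalso
          have hjm : j ∈ (pvRelease oc li (o.1, o.2.1)).2 :=
            (hchar j).mpr ⟨by omega, hf⟩
          rw [hcase] at hjm
          rcases List.mem_cons.mp hjm with rfl | hmem
          · omega
          · exact absurd (hmin j hmem) (by omega)
      have hplace := place_some o salas i hi.1 hi.2 hbefore
      have hA : pvStepA salas o =
          salas.set i ((salas.getD i []) ++ [(o.1, o.2.1, o.2.2.1, o.2.2.2)]) := by
        simp [pvStepA, hplace]
      have hstep : pvStepB (salas, li, oc) o =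
          (salas.set i ((salas.getD i []) ++ [(o.1, o.2.1, o.2.2.1, o.2.2.2)]), restL,
            pvInsortBusy (pvRelease oc li (o.1, o.2.1)).1 ((o.2.2.1, o.2.2.2 + 15), i)) := by
        simp only [pvStepB, hcase]
      rw [hcase] at hnodup
      have hni1 : i ∉ (pvRelease oc li (o.1, o.2.1)).1.map (·.2) := by
        intro hmem
        exact (List.disjoint_of_nodup_append hnodup) (List.mem_cons_self ..) hmem
      have hnirest : i ∉ restL := by
        have h := (List.nodup_append.mp hnodup).1
        exact (List.nodup_cons.mp h).1
      rw [hstep, hA]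
      refine ⟨rfl, ?_, ?_, ?_, ?_, ?_⟩
      · exact (List.pairwise_cons.mp (hcase ▸ hrliP)).2
      · exact insortBusy_pairwise _ hrocP
      · intro e he
        rcases List.mem_cons.mp ((insortBusy_perm ..).mem_iff.mp he) with rfl | he
        · refine ⟨by simpa using hi.1, ?_⟩
          have hgd : (salas.set i ((salas.getD i []) ++
              [(o.1, o.2.1, o.2.2.1, o.2.2.2)])).getD i [] =
              (salas.getD i []) ++ [(o.1, o.2.1, o.2.2.1, o.2.2.2)] := by
            simp [List.getD, hi.1]
          rw [hgd]
          simp [roomKey]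
        · have hne : e.2 ≠ i := fun h => hni1 (List.mem_map.mpr ⟨e, he, h⟩)
          refine ⟨by simpa using (hrocK e he).1, ?_⟩
          have hgd : (salas.set i ((salas.getD i []) ++
              [(o.1, o.2.1, o.2.2.1, o.2.2.2)])).getD e.2 [] = salas.getD e.2 [] := by
            simp [List.getD, List.getElem?_set_ne (Ne.symm hne)]
          rw [hgd]
          exact (hrocK e he).2.1
      · intro j hj
        have hne : j ≠ i := fun h => hnirest (h ▸ hj)
        have hjmem : j ∈ (pvRelease oc li (o.1, o.2.1)).2 := by
          rw [hcase]; exact List.mem_cons_of_mem _ hj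
        have hgd : (salas.set i ((salas.getD i []) ++
            [(o.1, o.2.1, o.2.2.1, o.2.2.2)])).getD j [] = salas.getD j [] := by
          simp [List.getD, List.getElem?_set_ne (Ne.symm hne)]
        refine ⟨by simpa using (hrliF j hjmem).1, ?_⟩
        show pvFits _ (o.1, o.2.1) = true
        rw [hgd]
        exact (hrliF j hjmem).2
      · have h1 : (pvInsortBusy (pvRelease oc li (o.1, o.2.1)).1
            ((o.2.2.1, o.2.2.2 + 15), i)).map (·.2) |>.Perm
            (i :: (pvRelease oc li (o.1, o.2.1)).1.map (·.2)) :=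
          (insortBusy_perm ..).map _
        have h2 := (h1.append_left restL).trans
          (List.perm_middle (a := i) (l₁ := restL)
            (l₂ := (pvRelease oc li (o.1, o.2.1)).1.map (·.2)))
        simp only [List.length_set]
        have h4 := hperm'
        rw [hcase] at h4
        exact h2.trans h4
  | nil =>
      have hnone : ∀ j, j < salas.length → pvFits (salas.getD j []) (o.1, o.2.1) = false := by
        intro j hj
        cases hf : pvFits (salas.getD j []) (o.1, o.2.1)
        · rfl
        · exfalso
          have hjm : j ∈ (pvRelease oc li (o.1, o.2.1)).2 := (hchar j).mpr ⟨hj, hf⟩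
          rw [hcase] at hjm
          simp at hjm
      have hplace := place_none o salas hnone
      have hA : pvStepA salas o = salas ++ [[(o.1, o.2.1, o.2.2.1, o.2.2.2)]] := by
        simp [pvStepA, hplace]
      have hstep : pvStepB (salas, li, oc) o =
          (salas ++ [[(o.1, o.2.1, o.2.2.1, o.2.2.2)]], ([] : List Nat),
            pvInsortBusy (pvRelease oc li (o.1, o.2.1)).1
              ((o.2.2.1, o.2.2.2 + 15), salas.length)) := by
        simp only [pvStepB, hcase]
      rw [hstep, hA]
      refine ⟨rfl, List.Pairwise.nil, insortBusy_pairwise _ hrocP, ?_, by simp, ?_⟩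
      · intro e he
        rcases List.mem_cons.mp ((insortBusy_perm ..).mem_iff.mp he) with rfl | he
        · refine ⟨by simp, ?_⟩
          have hgd : (salas ++ [[(o.1, o.2.1, o.2.2.1, o.2.2.2)]]).getD salas.length [] =
              [(o.1, o.2.1, o.2.2.1, o.2.2.2)] := by
            simp [List.getD]
          rw [hgd]
          simp [roomKey]
        · have hB := (hrocK e he).1
          refine ⟨by simp; omega, ?_⟩
          have hgd : (salas ++ [[(o.1, o.2.1, o.2.2.1, o.2.2.2)]]).getD e.2 [] =
              salas.getD e.2 [] := by
            simp [List.getD, List.getElem?_append_left hB]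
          rw [hgd]
          exact (hrocK e he).2.1
      · have h1 : (pvInsortBusy (pvRelease oc li (o.1, o.2.1)).1
            ((o.2.2.1, o.2.2.2 + 15), salas.length)).map (·.2) |>.Perm
            (salas.length :: (pvRelease oc li (o.1, o.2.1)).1.map (·.2)) :=
          (insortBusy_perm ..).map _
        have h2 : ((pvRelease oc li (o.1, o.2.1)).1.map (·.2)).Perm
            (List.range salas.length) := by
          have h := hperm'
          rw [hcase] at h
          simpa using h
        have h3 : (salas.length :: (pvRelease oc li (o.1, o.2.1)).1.map (·.2)).Perm
            (List.range (salas.length + 1)) := by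
          rw [List.range_succ]
          exact (h2.cons _).trans
            (by simpa using (List.perm_middle (l₁ := List.range salas.length)
              (a := salas.length) (l₂ := [])).symm)
        simpa using h1.trans h3

lemma fold_sim : ∀ (l : List (Int × Int × Int × Int)) salas li oc t,
    SimInv salas li oc t →
    l.Pairwise (fun a b => KLE (a.1, a.2.1) (b.1, b.2.1)) →
    (∀ o ∈ l, TLE t (o.1, o.2.1)) →
    (l.foldl pvStepB (salas, li, oc)).1 = l.foldl pvStepA salas := by
  intro l
  induction l with
  | nil => intro salas li oc t _ _ _; rfl
  | cons o l ih =>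
      intro salas li oc t hInv hpw hT
      have hstep := step_sim salas li oc t o hInv (hT o (List.mem_cons_self ..))
      rw [List.pairwise_cons] at hpw
      have hT' : ∀ o' ∈ l, TLE (some (o.1, o.2.1)) (o'.1, o'.2.1) :=
        fun o' ho' => hpw.1 o' ho'
      have heta : pvStepB (salas, li, oc) o =
          ((pvStepB (salas, li, oc) o).1, (pvStepB (salas, li, oc) o).2.1,
            (pvStepB (salas, li, oc) o).2.2) := rfl
      calc (List.foldl pvStepB (pvStepB (salas, li, oc) o) l).1
          = (List.foldl pvStepB ((pvStepB (salas, li, oc) o).1,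
              (pvStepB (salas, li, oc) o).2.1, (pvStepB (salas, li, oc) o).2.2) l).1 := by
            rw [← heta]
        _ = List.foldl pvStepA (pvStepB (salas, li, oc) o).1 l :=
            ih _ _ _ _ hstep.2 hpw.2 hT'
        _ = List.foldl pvStepA (pvStepA salas o) l := by rw [hstep.1]

lemma insertBy_pairwise {α : Type} (before : α → α → Bool) (R : α → α → Prop)
    (h1 : ∀ a b, before a b = true → R a b) (h2 : ∀ a b, before a b = false → R b a)
    (htr : ∀ a b c, R a b → R b c → R a c) (x : α) :
    ∀ ys, ys.Pairwise R → (PySem.List.insertBy before x ys).Pairwise R := by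
  intro ys
  induction ys with
  | nil => intro _; simp [PySem.List.insertBy]
  | cons y ys ih =>
      intro h
      rw [List.pairwise_cons] at h
      rw [PySem.List.insertBy]
      split
      · rename_i hb
        refine List.pairwise_cons.mpr ⟨?_, List.pairwise_cons.mpr h⟩
        intro z hz
        rcases List.mem_cons.mp hz with rfl | hz
        · exact h1 _ _ hb
        · exact htr _ _ _ (h1 _ _ hb) (h.1 z hz)
      · rename_i hb
        refine List.pairwise_cons.mpr ⟨?_, ih h.2⟩
        intro z hz
        rcases (PySem.List.mem_insertBy ..).mp hz with rfl | hz
        · exact h2 _ _ (Bool.eq_false_iff.mpr hb)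
        · exact h.1 z hz

lemma foldl_insertBy_pairwise {α : Type} (before : α → α → Bool) (R : α → α → Prop)
    (h1 : ∀ a b, before a b = true → R a b) (h2 : ∀ a b, before a b = false → R b a)
    (htr : ∀ a b c, R a b → R b c → R a c) :
    ∀ (xs acc : List α), acc.Pairwise R →
      (xs.foldl (fun a x => PySem.List.insertBy before x a) acc).Pairwise R := by
  intro xs
  induction xs with
  | nil => intro acc h; simpa using h
  | cons x xs ih =>
      intro acc h
      exact ih _ (insertBy_pairwise before R h1 h2 htr x acc h)

lemma sorted2_pairwise_key (xs : List (Int × Int × Int × Int)) :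
    (PySem.List.sorted2 xs (fun x => x.1) (fun x => x.2.1) false).Pairwise
      (fun a b => KLE (a.1, a.2.1) (b.1, b.2.1)) := by
  have heq : PySem.List.sorted2 xs (fun x => x.1) (fun x => x.2.1) false
      = xs.foldl (fun acc x => PySem.List.insertBy
          (fun a b => decide (a.1 < b.1) || (!decide (b.1 < a.1) && decide (a.2.1 < b.2.1)))
          x acc) [] := rfl
  rw [heq]
  refine foldl_insertBy_pairwise _ _ ?_ ?_ ?_ xs [] (by simp)
  · intro a b h; simp at h; unfold KLE; dsimp; omega
  · intro a b h; simp at h; unfold KLE; dsimp; omega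
  · intro a b c hab hbc; exact KLE_trans hab hbc

lemma inv_init (n : Nat) : SimInv (List.replicate n []) (List.range n) [] none := by
  refine ⟨List.pairwise_le_range, List.Pairwise.nil, ?_, ?_, ?_⟩
  · intro e he; simp at he
  · intro i hi
    rw [List.mem_range] at hi
    refine ⟨by simpa using hi, ?_⟩
    show (List.replicate n ([] : List (Int × Int × Int × Int))).getD i [] = []
    simp [List.getD, hi]
  · simp

-- ===== VERDICT (by name: the statement is the Claim_ definition above) =====
theorem asignar_salas_spec : Claim_equal_asignar_salas := by
  intro oradores m _
  unfold Spec_asignar_salas asignar_salas asignar_salas_alt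
  exact (fold_sim _ _ _ _ none (inv_init m.toNat) (sorted2_pairwise_key oradores)
    (fun o _ => trivial)).symm
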